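-- pv_equiv track=rewrite | github.com/AIWesty/training_algorithms | linear_search/video_ex.py | short_word
-- ===== SOURCE A (Python) =====
-- def short_word(seq):
--     ans = [] #список для коротких слов
--     min_symbols = len(seq[0]) #первый элемент самый короткий
--     for i in seq: #первый проход для количества букв в самом коротком слове
--         if len(i) < min_symbols:
--             min_symbols = len(i)
--     for j in seq: #второй проход длядобавления всех коротких слов
--         if len(j) == min_symbols:
--             ans.append(j)
--     return ', '.join(ans)
-- ===== SOURCE B (Python) =====
-- def short_word(seq):
--     min_symbols = len(seq[0])
--     ans = []
--     for w in seq: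
--         n = len(w)
--         if n < min_symbols:
--             min_symbols = n
--             ans = [w]
--         elif n == min_symbols:
--             ans.append(w)
--     return ', '.join(ans)
-- ===== Notes on version B (the rewrite author's own statement) =====
-- stated objective: alternative
-- what changed: B replaces A's two sequential passes (find the minimum length, then collect all words of that length) with a single pass that maintains a resettable accumulator: a new minimum resets the answer list, an equal length appends.
import Mathlib
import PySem

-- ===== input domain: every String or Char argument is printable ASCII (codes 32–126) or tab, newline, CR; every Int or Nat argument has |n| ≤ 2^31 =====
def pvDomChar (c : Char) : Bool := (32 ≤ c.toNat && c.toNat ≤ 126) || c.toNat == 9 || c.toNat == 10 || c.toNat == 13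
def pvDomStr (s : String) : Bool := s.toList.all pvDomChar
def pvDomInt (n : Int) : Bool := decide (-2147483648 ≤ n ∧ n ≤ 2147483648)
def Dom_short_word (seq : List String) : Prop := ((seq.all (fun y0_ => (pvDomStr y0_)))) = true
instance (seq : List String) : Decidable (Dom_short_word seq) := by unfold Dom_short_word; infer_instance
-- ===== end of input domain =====

-- B is a single pass with a resettable accumulator instead of A's two passes (same cost; proved to return the same string).

-- ===== PORT A =====
-- step of A's first loop: 'if len(i) < min_symbols: min_symbols = len(i)'
def pvMinStep (m : Int) (s : String) : Int :=
  if PySem.Str.len s < m then PySem.Str.len s else m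

def short_word (seq : List String) : String :=
  match PySem.List.pyGet? seq 0 with
  | none => ""   -- IndexError on empty seq; excluded by Pre_short_word
  | some h =>
    let m := seq.foldl pvMinStep (PySem.Str.len h)
    let ans := seq.foldl (fun ans j => if PySem.Str.len j = m then ans ++ [j] else ans) ([] : List String)
    PySem.Str.join ", " ans

-- ===== PORT B =====
-- step of B's single loop: new minimum resets the answer list, equal length appends
def pvBStep (st : Int × List String) (w : String) : Int × List String :=
  if PySem.Str.len w < st.1 then (PySem.Str.len w, [w])
  else if PySem.Str.len w = st.1 then (st.1, st.2 ++ [w])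
  else st

def short_word_alt (seq : List String) : String :=
  match PySem.List.pyGet? seq 0 with
  | none => ""   -- IndexError on empty seq; excluded by Pre_short_word
  | some h =>
    let st := seq.foldl pvBStep (PySem.Str.len h, ([] : List String))
    PySem.Str.join ", " st.2

-- ===== PRECONDITION & SPEC =====
-- Pre_ excludes only the empty list, on which A (and B) raise IndexError at seq[0].
def Pre_short_word (seq : List String) : Prop := seq ≠ []
instance (seq : List String) : Decidable (Pre_short_word seq) := by unfold Pre_short_word; infer_instance
def pvWitness_short_word : List String := (["hi", "a", "b"])

def Spec_short_word (seq : List String) (out : String) : Prop := out = short_word_alt seq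
instance (seq : List String) (out : String) : Decidable (Spec_short_word seq out) := by unfold Spec_short_word; infer_instance

-- ===== CLAIM (what is proved, stated in full; the proofs are below) =====
def Claim_equal_short_word : Prop := ∀ (seq : List String), Dom_short_word seq → Pre_short_word seq → Spec_short_word seq (short_word seq)

-- ===== LEMMAS AND PROOFS =====

-- A's first loop never increases the running minimum
lemma minFold_le (l : List String) (m : Int) : l.foldl pvMinStep m ≤ m := by
  induction l generalizing m with
  | nil => exact le_refl m
  | cons w t ih =>
    simp only [List.foldl_cons, pvMinStep]
    split_ifs with h
    · exact (ih _).trans (le_of_lt h)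
    · exact ih _

-- B's single-pass state, characterised: the minimum is A's first fold, and the
-- accumulator is the filter by that final minimum (prefixed by the seed acc iff the minimum never dropped).
lemma foldB_eq (l : List String) (m : Int) (acc : List String) :
    l.foldl pvBStep (m, acc)
      = (l.foldl pvMinStep m,
         (if l.foldl pvMinStep m = m then acc else [])
           ++ l.filter (fun w => decide (PySem.Str.len w = l.foldl pvMinStep m))) := by
  induction l generalizing m acc with
  | nil => simp
  | cons w t ih =>
    rcases lt_trichotomy (PySem.Str.len w) m with h | h | h
    · -- len w < m : B resets, the seed acc is discarded
      have hstep : pvBStep (m, acc) w = (PySem.Str.len w, [w]) := by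
        unfold pvBStep; rw [if_pos h]
      have hmin : pvMinStep m w = PySem.Str.len w := by
        unfold pvMinStep; rw [if_pos h]
      have hne : t.foldl pvMinStep (PySem.Str.len w) ≠ m :=
        ne_of_lt (lt_of_le_of_lt (minFold_le t _) h)
      simp only [List.foldl_cons, hstep, hmin, ih, Prod.mk.injEq]
      refine ⟨trivial, ?_⟩
      rw [if_neg hne, List.filter_cons]
      by_cases hq : t.foldl pvMinStep (PySem.Str.len w) = PySem.Str.len w
      · rw [if_pos hq, if_pos (decide_eq_true hq.symm), List.singleton_append, List.nil_append]
      · rw [if_neg hq,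
          if_neg (fun hc => hq (of_decide_eq_true hc).symm)]
    · -- len w = m : B appends to the current accumulator
      have hstep : pvBStep (m, acc) w = (m, acc ++ [w]) := by
        unfold pvBStep
        rw [if_neg (by rw [h]; exact lt_irrefl m), if_pos h]
      have hmin : pvMinStep m w = m := by
        unfold pvMinStep; rw [if_neg (by rw [h]; exact lt_irrefl m)]
      simp only [List.foldl_cons, hstep, hmin, ih, Prod.mk.injEq]
      refine ⟨trivial, ?_⟩
      by_cases hq : t.foldl pvMinStep m = m
      · rw [if_pos hq, if_pos hq, List.filter_cons,
          if_pos (decide_eq_true (h.trans hq.symm)), List.append_assoc,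
          List.singleton_append]
      · rw [if_neg hq, if_neg hq, List.filter_cons,
          if_neg (fun hc => hq (h ▸ (of_decide_eq_true hc)).symm)]
    · -- m < len w : the word is ignored by both views
      have hstep : pvBStep (m, acc) w = (m, acc) := by
        unfold pvBStep
        rw [if_neg (not_lt.mpr (le_of_lt h)), if_neg (ne_of_gt h)]
      have hmin : pvMinStep m w = m := by
        unfold pvMinStep; rw [if_neg (not_lt.mpr (le_of_lt h))]
      simp only [List.foldl_cons, hstep, hmin, ih, Prod.mk.injEq]
      refine ⟨trivial, ?_⟩
      rw [List.filter_cons,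
        if_neg (fun hc => absurd (of_decide_eq_true hc)
          (ne_of_gt (lt_of_le_of_lt (minFold_le t m) h)))]

-- ===== VERDICT (by name: the statement is the Claim_ definition above) =====
theorem short_word_spec : Claim_equal_short_word := by
  intro seq _ hpre
  unfold Spec_short_word short_word short_word_alt
  cases seq with
  | nil => exact absurd rfl hpre
  | cons h t =>
    have hget : PySem.List.pyGet? (h :: t) 0 = some h := by
      simp [PySem.List.pyGet?, PySem.List.pyIdx?]
    rw [hget]
    simp only [foldB_eq, ite_self, List.nil_append,
      PySem.List.foldl_append_ite_eq_filter]
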